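-- pv_equiv track=rewrite | github.com/palm7710/algorithm | ex_python3/2026_01/02/main.py | getSubstringCount
-- ===== SOURCE A (Python) =====
-- def getSubstringCount(s):
--     # まずsを左から見て、同じ文字が連続する長さを数える
--     runs = []
--     cnt = 1
--
--     for i in range(1, len(s)):
--         if s[i] == s[i - 1]:
--             cnt += 1
--         else:
--             runs.append(cnt)
--             cnt = 1
--     runs.append(cnt)
--
--     # (runs[i], runs[i+1]) ごとに、 min(runs[i], runs[i+1]) 個
--     ans = 0
--     for i in range(len(runs) - 1):
--         ans += min(runs[i], runs[i + 1])
--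
--     return ans
-- ===== SOURCE B (Python) =====
-- def getSubstringCount(s):
--     # For each boundary i (s[i] != s[i-1]) expand two pointers outward,
--     # counting how far the two equal-character blocks mirror each other.
--     ans = 0
--     for i in range(1, len(s)):
--         if s[i] != s[i - 1]:
--             d = 1
--             while i - 1 - d >= 0 and i + d < len(s) and s[i - 1 - d] == s[i - 1] and s[i + d] == s[i]:
--                 d += 1
--             ans += d
--     return ans
-- ===== Notes on version B (the rewrite author's own statement) =====
-- stated objective: alternative
-- what changed: A run-length encodes the string and then sums min over adjacent run pairs; B never builds runs: at each boundary s[i] != s[i-1] it expands two pointers outward while the mirrored characters match, adding the expansion width (a center-expansion algorithm, as for counting binary substrings).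
import Mathlib
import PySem

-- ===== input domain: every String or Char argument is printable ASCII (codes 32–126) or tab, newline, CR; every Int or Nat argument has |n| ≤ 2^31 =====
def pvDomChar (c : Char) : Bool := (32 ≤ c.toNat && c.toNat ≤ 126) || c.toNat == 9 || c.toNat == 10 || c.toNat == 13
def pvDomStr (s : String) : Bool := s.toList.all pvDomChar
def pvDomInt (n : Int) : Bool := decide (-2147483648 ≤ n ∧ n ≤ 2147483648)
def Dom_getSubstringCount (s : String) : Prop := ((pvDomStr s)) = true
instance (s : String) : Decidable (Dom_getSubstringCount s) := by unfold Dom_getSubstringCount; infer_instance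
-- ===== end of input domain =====

-- B replaces A's run-length-encoding passes by a different algorithm: at each
-- boundary s[i] != s[i-1] it expands two pointers outward, counting mirrored
-- equal-character positions; objective: alternative.

-- ===== PORT A =====
def getSubstringCount (s : String) : Int :=
  let l := s.toList
  let st := (PySem.List.pyRange 1 (l.length : Int) 1).foldl
      (fun (st : List Int × Int) i =>
        if PySem.List.pyGetD l i ' ' = PySem.List.pyGetD l (i - 1) ' ' then
          (st.1, st.2 + 1)
        else
          (st.1 ++ [st.2], 1)) ([], 1)
  let runs := st.1 ++ [st.2]
  (PySem.List.pyRange 0 ((runs.length : Int) - 1) 1).foldl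
    (fun (a : Int) i => a + min (PySem.List.pyGetD runs i 0) (PySem.List.pyGetD runs (i + 1) 0)) 0

-- ===== PORT B =====
/-- B's inner `while` loop (fuel `l.length` is enough: the guard forces
`d < l.length`, so the loop runs fewer than `l.length` times). -/
def pvWhileB (l : List Char) (i : Int) (d : Int) : Nat → Int
  | 0 => d
  | fuel + 1 =>
    if 0 ≤ i - 1 - d ∧ i + d < (l.length : Int) ∧
       PySem.List.pyGetD l (i - 1 - d) ' ' = PySem.List.pyGetD l (i - 1) ' ' ∧
       PySem.List.pyGetD l (i + d) ' ' = PySem.List.pyGetD l i ' '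
    then pvWhileB l i (d + 1) fuel
    else d

def getSubstringCount_alt (s : String) : Int :=
  let l := s.toList
  (PySem.List.pyRange 1 (l.length : Int) 1).foldl
    (fun (ans : Int) i =>
      if PySem.List.pyGetD l i ' ' ≠ PySem.List.pyGetD l (i - 1) ' '
      then ans + pvWhileB l i 1 l.length
      else ans) 0

-- ===== PRECONDITION & SPEC =====
def Spec_getSubstringCount (s : String) (out : Int) : Prop := out = getSubstringCount_alt s
instance (s : String) (out : Int) : Decidable (Spec_getSubstringCount s out) := by unfold Spec_getSubstringCount; infer_instance

-- ===== CLAIM (what is proved, stated in full; the proofs are below) =====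
def Claim_equal_getSubstringCount : Prop := ∀ (s : String), Dom_getSubstringCount s → Spec_getSubstringCount s (getSubstringCount s)

-- ===== LEMMAS AND PROOFS =====

/-- sum of `min` over adjacent pairs. -/
def adjSum : List Int → Int
  | a :: b :: t => min a b + adjSum (b :: t)
  | _ => 0

/-- A's first loop body over Nat indices (proof-only helper). -/
def stepN (l : List Char) (st : List Int × Int) (i : Nat) : List Int × Int :=
  if l.getD i ' ' = l.getD (i - 1) ' ' then (st.1, st.2 + 1) else (st.1 ++ [st.2], 1)

/-- the run-length list A's first loop builds, over Nat indices. -/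
def runsN (l : List Char) : List Int :=
  (((List.range (l.length - 1)).map (· + 1)).foldl (stepN l) ([], 1)).1
    ++ [(((List.range (l.length - 1)).map (· + 1)).foldl (stepN l) ([], 1)).2]

/-- length of the block of characters equal to `l[i-1]` ending at `i-1`. -/
def lcN (l : List Char) (i : Nat) : Nat :=
  (((l.take i).reverse).takeWhile (fun x => x == l.getD (i - 1) ' ')).length

/-- length of the block of characters equal to `l[i]` starting at `i`. -/
def rcN (l : List Char) (i : Nat) : Nat :=
  ((l.drop i).takeWhile (fun x => x == l.getD i ' ')).length

/-- what B adds at index `i`. -/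
def contrib (l : List Char) (i : Nat) : Int :=
  if l.getD i ' ' = l.getD (i - 1) ' ' then 0 else ((min (lcN l i) (rcN l i) : Nat) : Int)

/-- B's total, over Nat indices. -/
def natB (l : List Char) : Int :=
  ((List.range (l.length - 1)).map (fun k => contrib l (k + 1))).sum

/-- length of the first run. -/
def frunN (m : List Char) : Nat := (m.takeWhile (fun x => x == m.getD 0 ' ')).length

theorem adjSum_cons_cons (a b : Int) (t : List Int) :
    adjSum (a :: b :: t) = min a b + adjSum (b :: t) := rfl

-- takeWhile toolbox
theorem takeWhile_mem_spec (p : Char → Bool) (xs : List Char) (k : Nat)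
    (hk : k < (xs.takeWhile p).length) : p (xs.getD k ' ') = true ∧ k < xs.length := by
  induction xs generalizing k with
  | nil => simp [List.takeWhile] at hk
  | cons a t ih =>
    rw [List.takeWhile_cons] at hk
    by_cases hp : p a
    · simp only [hp, if_true, List.length_cons] at hk
      cases k with
      | zero => exact ⟨by simpa using hp, by simp⟩
      | succ k =>
        have := ih k (by omega)
        exact ⟨by simpa using this.1, by simpa using this.2⟩
    · simp [hp] at hk

theorem takeWhile_stop_spec (p : Char → Bool) (xs : List Char)
    (h : (xs.takeWhile p).length < xs.length) :
    p (xs.getD ((xs.takeWhile p).length) ' ') = false := by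
  induction xs with
  | nil => simp at h
  | cons a t ih =>
    rw [List.takeWhile_cons] at h ⊢
    by_cases hp : p a
    · simp only [hp, if_true, List.length_cons] at h ⊢
      simpa using ih (by omega)
    · simpa [hp] using hp

theorem takeWhile_length_le (p : Char → Bool) (xs : List Char) :
    (xs.takeWhile p).length ≤ xs.length :=
  List.Sublist.length_le (List.takeWhile_sublist p)

theorem takeWhile_pos (p : Char → Bool) (xs : List Char) (hx : xs ≠ [])
    (h0 : p (xs.getD 0 ' ') = true) : 1 ≤ (xs.takeWhile p).length := by
  cases xs with
  | nil => exact absurd rfl hx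
  | cons a t => simp only [List.getD_cons_zero] at h0; simp [h0]

theorem takeWhile_append_cases (p : Char → Bool) (xs ys : List Char) :
    (xs ++ ys).takeWhile p =
      if (xs.takeWhile p).length = xs.length then xs ++ ys.takeWhile p else xs.takeWhile p := by
  induction xs with
  | nil => simp
  | cons a t ih =>
    by_cases hp : p a
    · simp only [List.cons_append, List.takeWhile_cons, hp, if_true, List.length_cons, ih]
      split_ifs with h1 h2 h3 <;> simp_all <;> omega
    · simp [List.takeWhile_cons, hp]

theorem takeWhile_full_all (p : Char → Bool) (xs : List Char)
    (h : (xs.takeWhile p).length = xs.length) : ∀ x ∈ xs, p x = true := by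
  have := (List.takeWhile_prefix (l := xs) p).eq_of_length h
  intro x hx
  rw [← this] at hx
  exact List.mem_takeWhile_imp hx

theorem takeWhile_replicate_neg (p : Char → Bool) (a : Nat) (c : Char) (hc : p c = false) :
    (List.replicate a c).takeWhile p = [] := by
  cases a with
  | zero => rfl
  | succ n => simp [List.replicate_succ, List.takeWhile_cons, hc]

theorem takeWhile_replicate_pos (p : Char → Bool) (a : Nat) (c : Char) (hc : p c = true) :
    (List.replicate a c).takeWhile p = List.replicate a c := by
  induction a with
  | zero => rfl
  | succ n ih => simp [List.replicate_succ, hc, ih]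

-- getD index toolbox
theorem getD_rev_take (l : List Char) (i d : Nat) (hd : d < i) (hi : i ≤ l.length) :
    ((l.take i).reverse).getD d ' ' = l.getD (i - 1 - d) ' ' := by
  have hlen : (l.take i).length = i := by simp [Nat.min_eq_left hi]
  have hd' : d < ((l.take i).reverse).length := by simpa [hlen] using hd
  rw [List.getD_eq_getElem _ _ hd', List.getElem_reverse]
  have h2 : i - 1 - d < l.length := by omega
  rw [List.getD_eq_getElem _ _ h2]
  simp only [hlen]
  rw [List.getElem_take]

theorem getD_drop (l : List Char) (i d : Nat) :
    (l.drop i).getD d ' ' = l.getD (i + d) ' ' := by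
  by_cases h : i + d < l.length
  · have h1 : d < (l.drop i).length := by simp; omega
    rw [List.getD_eq_getElem _ _ h1, List.getD_eq_getElem _ _ h, List.getElem_drop]
  · rw [List.getD_eq_default _ _ (by simp; omega), List.getD_eq_default _ _ (by omega)]

theorem getD_append_shift (a : Nat) (c : Char) (m : List Char) (j : Nat) :
    (List.replicate a c ++ m).getD (a + j) ' ' = m.getD j ' ' := by
  by_cases h : j < m.length
  · have h1 : a + j < (List.replicate a c ++ m).length := by simp; omega
    rw [List.getD_eq_getElem _ _ h1, List.getD_eq_getElem _ _ h]
    rw [List.getElem_append_right (by simp)]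
    simp
  · rw [List.getD_eq_default _ _ (by simp; omega), List.getD_eq_default _ _ (by omega)]

theorem getD_append_left (a : Nat) (c : Char) (m : List Char) (k : Nat) (hk : k < a) :
    (List.replicate a c ++ m).getD k ' ' = c := by
  have h1 : k < (List.replicate a c ++ m).length := by simp; omega
  rw [List.getD_eq_getElem _ _ h1, List.getElem_append_left (by simpa)]
  simp

-- lcN/rcN bounds
theorem lcN_pos (l : List Char) (i : Nat) (h1 : 1 ≤ i) (h2 : i < l.length) : 1 ≤ lcN l i := by
  apply takeWhile_pos
  · have : ((l.take i).reverse).length = i := by simp; omega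
    intro h; rw [h] at this; simp at this; omega
  · rw [getD_rev_take l i 0 (by omega) (by omega)]
    simp

theorem rcN_pos (l : List Char) (i : Nat) (h2 : i < l.length) : 1 ≤ rcN l i := by
  apply takeWhile_pos
  · intro h
    have : (l.drop i).length = 0 := by rw [h]; rfl
    simp at this; omega
  · rw [getD_drop l i 0]
    simp

theorem lcN_le (l : List Char) (i : Nat) (h2 : i ≤ l.length) : lcN l i ≤ i := by
  have := takeWhile_length_le (fun x => x == l.getD (i - 1) ' ') ((l.take i).reverse)
  simpa [Nat.min_eq_left h2] using this

theorem rcN_le (l : List Char) (i : Nat) : rcN l i ≤ l.length - i := by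
  have := takeWhile_length_le (fun x => x == l.getD i ' ') (l.drop i)
  simpa using this

-- the while loop's guard, characterized
theorem pvCondTrue (l : List Char) (i : Nat) (h1 : 1 ≤ i) (h2 : i < l.length)
    (d : Nat) (hd : d < min (lcN l i) (rcN l i)) :
    0 ≤ (i : Int) - 1 - d ∧ (i : Int) + d < (l.length : Int) ∧
    PySem.List.pyGetD l ((i : Int) - 1 - d) ' ' = PySem.List.pyGetD l ((i : Int) - 1) ' ' ∧
    PySem.List.pyGetD l ((i : Int) + d) ' ' = PySem.List.pyGetD l ((i : Int)) ' ' := by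
  have hdl : d < lcN l i := lt_of_lt_of_le hd (Nat.min_le_left _ _)
  have hdr : d < rcN l i := lt_of_lt_of_le hd (Nat.min_le_right _ _)
  have hdi : d < i := lt_of_lt_of_le hdl (lcN_le l i (le_of_lt h2))
  have hrn : d < l.length - i := lt_of_lt_of_le hdr (rcN_le l i)
  have hL := takeWhile_mem_spec _ _ d hdl
  have hR := takeWhile_mem_spec _ _ d hdr
  rw [getD_rev_take l i d hdi (le_of_lt h2)] at hL
  rw [getD_drop l i d] at hR
  have e1 : (i : Int) - 1 - d = ((i - 1 - d : Nat) : Int) := by omega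
  have e2 : (i : Int) - 1 = ((i - 1 : Nat) : Int) := by omega
  have e3 : (i : Int) + d = ((i + d : Nat) : Int) := by omega
  refine ⟨by omega, by omega, ?_, ?_⟩
  · rw [e1, e2, PySem.List.pyGetD_natCast, PySem.List.pyGetD_natCast]
    simpa using hL.1
  · rw [e3, PySem.List.pyGetD_natCast]
    have : PySem.List.pyGetD l (i : Int) ' ' = l.getD i ' ' := PySem.List.pyGetD_natCast ..
    rw [this]
    simpa using hR.1

theorem pvCondFalse (l : List Char) (i : Nat) (h1 : 1 ≤ i) (h2 : i < l.length) :
    ¬ (0 ≤ (i : Int) - 1 - (min (lcN l i) (rcN l i) : Nat) ∧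
       (i : Int) + (min (lcN l i) (rcN l i) : Nat) < (l.length : Int) ∧
       PySem.List.pyGetD l ((i : Int) - 1 - (min (lcN l i) (rcN l i) : Nat)) ' '
         = PySem.List.pyGetD l ((i : Int) - 1) ' ' ∧
       PySem.List.pyGetD l ((i : Int) + (min (lcN l i) (rcN l i) : Nat)) ' '
         = PySem.List.pyGetD l ((i : Int)) ' ') := by
  rintro ⟨hA, hB, hC, hD⟩
  have hlceq : (((l.take i).reverse).takeWhile (fun x => x == l.getD (i - 1) ' ')).length
      = lcN l i := rfl
  have hrceq : ((l.drop i).takeWhile (fun x => x == l.getD i ' ')).length = rcN l i := rfl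
  by_cases hcase : lcN l i ≤ rcN l i
  · have hkl : min (lcN l i) (rcN l i) = lcN l i := by omega
    rw [hkl] at hA hC
    have hki : lcN l i < i := by omega
    have hstop := takeWhile_stop_spec (fun x => x == l.getD (i - 1) ' ') ((l.take i).reverse)
      (by rw [List.length_reverse, List.length_take, hlceq]; omega)
    rw [hlceq, getD_rev_take l i (lcN l i) hki (le_of_lt h2)] at hstop
    have e1 : (i : Int) - 1 - (lcN l i : Nat) = ((i - 1 - lcN l i : Nat) : Int) := by omega
    have e2 : (i : Int) - 1 = ((i - 1 : Nat) : Int) := by omega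
    rw [e1, e2, PySem.List.pyGetD_natCast, PySem.List.pyGetD_natCast] at hC
    have hne : l.getD (i - 1 - lcN l i) ' ' ≠ l.getD (i - 1) ' ' := by simpa using hstop
    exact hne hC
  · have hkr : min (lcN l i) (rcN l i) = rcN l i := by omega
    rw [hkr] at hB hD
    have hkn : i + rcN l i < l.length := by omega
    have hstop := takeWhile_stop_spec (fun x => x == l.getD i ' ') (l.drop i)
      (by rw [List.length_drop, hrceq]; omega)
    rw [hrceq, getD_drop l i (rcN l i)] at hstop
    have e3 : (i : Int) + (rcN l i : Nat) = ((i + rcN l i : Nat) : Int) := by omega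
    rw [e3, PySem.List.pyGetD_natCast] at hD
    have e4 : PySem.List.pyGetD l (i : Int) ' ' = l.getD i ' ' := PySem.List.pyGetD_natCast ..
    rw [e4] at hD
    have hne : l.getD (i + rcN l i) ' ' ≠ l.getD i ' ' := by simpa using hstop
    exact hne hD

theorem pvWhileB_eq (l : List Char) (i : Nat) (h1 : 1 ≤ i) (h2 : i < l.length) :
    ∀ (fuel d : Nat), 1 ≤ d → d ≤ min (lcN l i) (rcN l i) →
      min (lcN l i) (rcN l i) ≤ d + fuel →
      pvWhileB l (i : Int) (d : Int) fuel = ((min (lcN l i) (rcN l i) : Nat) : Int) := by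
  intro fuel
  induction fuel with
  | zero =>
    intro d _ hd2 hd3
    have : d = min (lcN l i) (rcN l i) := by omega
    simp [pvWhileB, this]
  | succ fuel ih =>
    intro d hd1 hd2 hd3
    rw [pvWhileB]
    rcases Nat.lt_or_ge d (min (lcN l i) (rcN l i)) with hlt | hge
    · rw [if_pos (pvCondTrue l i h1 h2 d hlt)]
      have : ((d : Int) + 1) = ((d + 1 : Nat) : Int) := by omega
      rw [this]
      exact ih (d + 1) (by omega) (by omega) (by omega)
    · have hdk : d = min (lcN l i) (rcN l i) := by omega
      rw [if_neg (by rw [hdk]; exact pvCondFalse l i h1 h2), hdk]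

-- bridges: the ports compute adjSum (runsN l) resp. natB l
theorem natLoop (rs : List Int) :
    ((List.range (rs.length - 1)).map
        (fun k => min (rs.getD k 0) (rs.getD (k + 1) 0))).sum = adjSum rs := by
  induction rs with
  | nil => simp [adjSum]
  | cons a t ih =>
    cases t with
    | nil => simp [adjSum]
    | cons b u =>
      have hlen : (a :: b :: u).length - 1 = ((b :: u).length - 1) + 1 := by
        simp
      rw [hlen, List.range_succ_eq_map, List.map_cons, List.sum_cons, List.map_map,
        adjSum_cons_cons, ← ih]
      simp only [List.getD, zero_add]
      apply congrArg
      apply congrArg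
      apply List.map_congr_left
      intro k _
      simp [Function.comp]

theorem loop2_eq (rs : List Int) :
    (PySem.List.pyRange 0 ((rs.length : Int) - 1) 1).foldl
      (fun (a : Int) i => a + min (PySem.List.pyGetD rs i 0) (PySem.List.pyGetD rs (i + 1) 0)) 0
      = adjSum rs := by
  rw [PySem.List.foldl_add, PySem.List.pyRange_one, List.map_map]
  have ht : (((rs.length : Int) - 1) - 0).toNat = rs.length - 1 := by omega
  rw [ht, ← natLoop rs, zero_add]
  apply congrArg
  apply List.map_congr_left
  intro k _
  simp only [Function.comp, zero_add]
  have h2 : ((k : Int) + 1) = ((k + 1 : Nat) : Int) := by push_cast; ring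
  rw [h2, PySem.List.pyGetD_natCast, PySem.List.pyGetD_natCast]

theorem foldInt_eq_foldNat (l : List Char) :
    (PySem.List.pyRange 1 (l.length : Int) 1).foldl
      (fun (st : List Int × Int) i =>
        if PySem.List.pyGetD l i ' ' = PySem.List.pyGetD l (i - 1) ' ' then (st.1, st.2 + 1)
        else (st.1 ++ [st.2], 1)) ([], 1)
    = ((List.range (l.length - 1)).map (· + 1)).foldl (stepN l) ([], 1) := by
  rw [PySem.List.pyRange_one]
  have ht : ((l.length : Int) - 1).toNat = l.length - 1 := by omega
  rw [ht, List.foldl_map, List.foldl_map]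
  congr 1
  funext st k
  have e2 : (1 : Int) + k - 1 = ((k : Nat) : Int) := by omega
  have e1 : (1 : Int) + k = ((k + 1 : Nat) : Int) := by omega
  rw [e2, e1, PySem.List.pyGetD_natCast, PySem.List.pyGetD_natCast]
  simp [stepN]

theorem bridgeA (s : String) : getSubstringCount s = adjSum (runsN s.toList) := by
  show (PySem.List.pyRange 0 _ 1).foldl _ 0 = _
  rw [foldInt_eq_foldNat, loop2_eq]
  rfl

theorem bridgeB (s : String) : getSubstringCount_alt s = natB s.toList := by
  show (PySem.List.pyRange 1 (s.toList.length : Int) 1).foldl _ 0 = _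
  have hfun : (fun (ans : Int) i =>
        if PySem.List.pyGetD s.toList i ' ' ≠ PySem.List.pyGetD s.toList (i - 1) ' '
        then ans + pvWhileB s.toList i 1 s.toList.length else ans)
      = (fun (ans : Int) i => ans +
          (if PySem.List.pyGetD s.toList i ' ' ≠ PySem.List.pyGetD s.toList (i - 1) ' '
           then pvWhileB s.toList i 1 s.toList.length else 0)) := by
    funext ans i; split_ifs <;> simp
  rw [hfun, PySem.List.foldl_add, PySem.List.pyRange_one, List.map_map, zero_add]
  have ht : ((s.toList.length : Int) - 1).toNat = s.toList.length - 1 := by omega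
  rw [ht]
  show _ = natB s.toList
  unfold natB
  apply congrArg
  apply List.map_congr_left
  intro k hk
  rw [List.mem_range] at hk
  simp only [Function.comp]
  have e2 : (1 : Int) + k - 1 = ((k : Nat) : Int) := by omega
  have e1 : (1 : Int) + k = ((k + 1 : Nat) : Int) := by omega
  rw [e2, e1, PySem.List.pyGetD_natCast, PySem.List.pyGetD_natCast]
  by_cases hc : s.toList.getD (k + 1) ' ' = s.toList.getD k ' '
  · rw [if_neg (not_not_intro hc)]
    simp only [contrib, Nat.add_sub_cancel]
    rw [if_pos hc]
  · rw [if_pos (by simpa using hc)]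
    have h2 : k + 1 < s.toList.length := by omega
    have hmin1 : 1 ≤ min (lcN s.toList (k + 1)) (rcN s.toList (k + 1)) :=
      le_min (lcN_pos _ _ (by omega) h2) (rcN_pos _ _ h2)
    have hminle : min (lcN s.toList (k + 1)) (rcN s.toList (k + 1)) ≤ 1 + s.toList.length := by
      have h3 := lcN_le s.toList (k + 1) (by omega)
      have h4 := Nat.min_le_left (lcN s.toList (k + 1)) (rcN s.toList (k + 1))
      exact le_trans h4 (by omega)
    have := pvWhileB_eq s.toList (k + 1) (by omega) h2 s.toList.length 1 le_rfl hmin1 hminle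
    rw [show ((1 : Nat) : Int) = (1 : Int) by simp] at this
    rw [this]
    simp only [contrib, Nat.add_sub_cancel]
    rw [if_neg hc]

-- structural lemmas on runsN / natB under the first-run decomposition
theorem foldA_prefix (l : List Char) (L : List Nat) (rs0 rs : List Int) (c : Int) :
    L.foldl (stepN l) (rs0 ++ rs, c)
      = (rs0 ++ (L.foldl (stepN l) (rs, c)).1, (L.foldl (stepN l) (rs, c)).2) := by
  induction L generalizing rs c with
  | nil => simp
  | cons i t ih =>
    simp only [List.foldl_cons, stepN]
    split_ifs with h
    · exact ih rs (c + 1)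
    · rw [show (rs0 ++ rs) ++ [c] = rs0 ++ (rs ++ [c]) by simp]
      exact ih (rs ++ [c]) 1

theorem foldA_allEq (l : List Char) (L : List Nat)
    (h : ∀ i ∈ L, l.getD i ' ' = l.getD (i - 1) ' ') (rs : List Int) (c0 : Int) :
    L.foldl (stepN l) (rs, c0) = (rs, c0 + L.length) := by
  induction L generalizing c0 with
  | nil => simp
  | cons i t ih =>
    simp only [List.foldl_cons, stepN, h i (by simp), if_true, List.length_cons]
    rw [ih (fun j hj => h j (by simp [hj])) (c0 + 1)]
    simp only [Prod.mk.injEq, true_and]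
    push_cast; ring

theorem runsN_ne_nil (l : List Char) : runsN l ≠ [] := by
  simp [runsN]

theorem adjSum_cons (a : Int) (rs : List Int) (h : rs ≠ []) :
    adjSum (a :: rs) = min a (rs.headD 0) + adjSum rs := by
  cases rs with
  | nil => exact absurd rfl h
  | cons b t => rfl

theorem decomp (m : List Char) (hm : m ≠ []) :
    m = List.replicate (frunN m) (m.getD 0 ' ') ++ m.dropWhile (fun x => x == m.getD 0 ' ')
    ∧ 1 ≤ frunN m
    ∧ (∀ x, (m.dropWhile (fun x => x == m.getD 0 ' ')).head? = some x → x ≠ m.getD 0 ' ') := by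
  have hrep : m.takeWhile (fun x => x == m.getD 0 ' ')
      = List.replicate (frunN m) (m.getD 0 ' ') := by
    have hall : ∀ x ∈ m.takeWhile (fun x => x == m.getD 0 ' '), x = m.getD 0 ' ' := by
      intro x hx
      have := List.mem_takeWhile_imp hx
      simpa using this
    exact List.eq_replicate_of_mem hall
  have hsplit := List.takeWhile_append_dropWhile (p := fun x => x == m.getD 0 ' ') (l := m)
  have hpos : 1 ≤ frunN m := takeWhile_pos _ m hm (by simp)
  refine ⟨by rw [← hrep, hsplit], hpos, ?_⟩
  intro x hx
  have hdw : m.dropWhile (fun x => x == m.getD 0 ' ') ≠ [] := by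
    intro hnil; rw [hnil] at hx; simp at hx
  have hlt : frunN m < m.length := by
    have hlen : m.length = frunN m + (m.dropWhile (fun x => x == m.getD 0 ' ')).length := by
      conv_lhs => rw [← hsplit]
      rw [List.length_append]
      rfl
    have : 0 < (m.dropWhile (fun x => x == m.getD 0 ' ')).length :=
      List.length_pos_iff.mpr hdw
    omega
  have hfr : (List.takeWhile (fun x => x == m.getD 0 ' ') m).length = frunN m := rfl
  have hstop := takeWhile_stop_spec (fun x => x == m.getD 0 ' ') m hlt
  simp only [hfr] at hstop
  have hidx : m.getD (frunN m) ' ' = (m.dropWhile (fun x => x == m.getD 0 ' ')).getD 0 ' ' := by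
    have h5 := getD_append_shift (frunN m) (m.getD 0 ' ')
      (m.dropWhile (fun x => x == m.getD 0 ' ')) 0
    rw [Nat.add_zero] at h5
    rw [← h5, ← hrep, hsplit]
  have hx0 : (m.dropWhile (fun x => x == m.getD 0 ' ')).getD 0 ' ' = x := by
    cases h : m.dropWhile (fun x => x == m.getD 0 ' ') with
    | nil => rw [h] at hx; simp at hx
    | cons y t => rw [h] at hx; simp at hx; simp [hx]
  rw [hidx, hx0] at hstop
  intro hcontra
  rw [hcontra] at hstop
  simp at hstop

theorem idx_split (a : Nat) (c : Char) (m : List Char) (ha : 1 ≤ a) :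
    (List.range ((List.replicate a c ++ m).length - 1)).map (· + 1)
      = ((List.range (a - 1)).map (· + 1)) ++ ((List.range m.length).map (fun j => a + j)) := by
  have hlen : (List.replicate a c ++ m).length = a + m.length := by simp
  rw [hlen, show a + m.length - 1 = (a - 1) + m.length by omega, List.range_add,
    List.map_append, List.map_map]
  congr 1
  apply List.map_congr_left
  intro j _
  simp only [Function.comp]
  omega

theorem first_block_eq (a : Nat) (c : Char) (m : List Char) :
    ∀ i ∈ (List.range (a - 1)).map (· + 1),
      (List.replicate a c ++ m).getD i ' ' = (List.replicate a c ++ m).getD (i - 1) ' ' := by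
  intro i hi
  simp only [List.mem_map, List.mem_range] at hi
  obtain ⟨k, hk, rfl⟩ := hi
  rw [getD_append_left a c m (k + 1) (by omega), getD_append_left a c m (k + 1 - 1) (by omega)]

theorem shift_list_eq (a t : Nat) :
    (List.range (t + 1)).map (fun j => a + j)
      = (a + 0) :: ((List.range t).map (· + 1)).map (fun j => a + j) := by
  rw [List.range_succ_eq_map, List.map_cons, List.map_map]

theorem stepN_shift (a : Nat) (c : Char) (m : List Char) (st : List Int × Int)
    (j : Nat) (hj : 1 ≤ j) :
    stepN (List.replicate a c ++ m) st (a + j) = stepN m st j := by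
  unfold stepN
  rw [getD_append_shift a c m j,
    show a + j - 1 = a + (j - 1) by omega, getD_append_shift a c m (j - 1)]

theorem runsN_rec (a : Nat) (c : Char) (m : List Char) (ha : 1 ≤ a)
    (hm : ∀ x, m.head? = some x → x ≠ c) :
    runsN (List.replicate a c ++ m) = if m = [] then [(a : Int)] else (a : Int) :: runsN m := by
  unfold runsN
  rw [idx_split a c m ha, List.foldl_append,
    foldA_allEq _ _ (first_block_eq a c m), List.length_map, List.length_range]
  have hA : (1 : Int) + ((a - 1 : Nat) : Int) = (a : Int) := by omega
  cases m with
  | nil =>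
    simp [hA]
  | cons x m' =>
    rw [if_neg (by simp)]
    rw [List.length_cons, shift_list_eq a m'.length, List.foldl_cons]
    have hstep : stepN (List.replicate a c ++ x :: m') ([], 1 + ((a - 1 : Nat) : Int)) (a + 0)
        = ([1 + ((a - 1 : Nat) : Int)], 1) := by
      unfold stepN
      rw [Nat.add_zero]
      rw [show (List.replicate a c ++ x :: m').getD a ' ' = x from by
            have := getD_append_shift a c (x :: m') 0
            rw [Nat.add_zero] at this
            rw [this]; rfl,
          getD_append_left a c (x :: m') (a - 1) (by omega)]
      rw [if_neg (hm x rfl)]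
      simp
    rw [hstep]
    rw [List.foldl_map, PySem.List.foldl_congr_mem _ _ (fun st j => stepN (x :: m') st j) _
      (by
        intro acc j hj
        simp only [List.mem_map, List.mem_range] at hj
        obtain ⟨k, hk, rfl⟩ := hj
        exact stepN_shift a c (x :: m') acc (k + 1) (by omega))]
    rw [show ([1 + ((a - 1 : Nat) : Int)], (1 : Int)) = ([1 + ((a - 1 : Nat) : Int)] ++ [], (1 : Int)) by simp,
      foldA_prefix]
    simp only [List.cons_append, List.nil_append]
    rw [hA]
    rfl

theorem contrib_shift (a : Nat) (c : Char) (m : List Char) (ha : 1 ≤ a)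
    (hm : ∀ x, m.head? = some x → x ≠ c) (j : Nat) (hj1 : 1 ≤ j) (hj2 : j < m.length) :
    contrib (List.replicate a c ++ m) (a + j) = contrib m j := by
  have hg1 : (List.replicate a c ++ m).getD (a + j) ' ' = m.getD j ' ' := getD_append_shift ..
  have hg0 : (List.replicate a c ++ m).getD (a + j - 1) ' ' = m.getD (j - 1) ' ' := by
    rw [show a + j - 1 = a + (j - 1) by omega, getD_append_shift]
  unfold contrib
  rw [hg1, hg0]
  by_cases hc : m.getD j ' ' = m.getD (j - 1) ' '
  · rw [if_pos hc, if_pos hc]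
  · rw [if_neg hc, if_neg hc]
    have hrc : rcN (List.replicate a c ++ m) (a + j) = rcN m j := by
      unfold rcN
      rw [hg1]
      have hdrop : (List.replicate a c ++ m).drop (a + j) = m.drop j := by
        rw [List.drop_append, List.drop_of_length_le (by simp)]
        simp
      rw [hdrop]
    have hlc : lcN (List.replicate a c ++ m) (a + j) = lcN m j := by
      unfold lcN
      rw [hg0]
      have htake : (List.replicate a c ++ m).take (a + j) = List.replicate a c ++ m.take j := by
        rw [List.take_append, List.take_of_length_le (by simp)]
        simp
      rw [htake, List.reverse_append, List.reverse_replicate, takeWhile_append_cases]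
      have hxslen : ((m.take j).reverse).length = j := by simp; omega
      split_ifs with hfull
      · -- the whole reversed prefix is one run, so it reaches m[0], and m[0] ≠ c:
        -- the replicate block contributes nothing
        have hall := takeWhile_full_all _ _ hfull
        have hm0mem : m.getD 0 ' ' ∈ (m.take j).reverse := by
          rw [List.mem_reverse]
          have h0 : 0 < (m.take j).length := by simp; omega
          have he : (m.take j)[0]'h0 = m[0]'(by omega) := List.getElem_take
          rw [List.getD_eq_getElem _ _ (by omega), ← he]
          exact List.getElem_mem h0
        have hm0 : m.getD 0 ' ' = m.getD (j - 1) ' ' := by simpa using hall _ hm0mem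
        have hm0c : m.getD 0 ' ' ≠ c := by
          cases m with
          | nil => simp at hj2
          | cons y t => simpa using hm y rfl
        rw [takeWhile_replicate_neg _ _ _ (by
          simp only [beq_eq_false_iff_ne]
          intro hcc
          exact hm0c (by rw [hm0, ← hcc]))]
        rw [List.length_append, List.length_nil, ← hfull]
        rfl
      · rfl
    rw [hrc, hlc]

theorem contrib_at_boundary (a : Nat) (c : Char) (x : Char) (m' : List Char) (ha : 1 ≤ a)
    (hm : ∀ y, (x :: m').head? = some y → y ≠ c) :
    contrib (List.replicate a c ++ x :: m') a = ((min a (frunN (x :: m')) : Nat) : Int) := by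
  have hga : (List.replicate a c ++ x :: m').getD a ' ' = (x :: m').getD 0 ' ' := by
    have := getD_append_shift a c (x :: m') 0
    rwa [Nat.add_zero] at this
  have hga1 : (List.replicate a c ++ x :: m').getD (a - 1) ' ' = c :=
    getD_append_left a c (x :: m') (a - 1) (by omega)
  unfold contrib
  rw [hga, hga1]
  rw [if_neg (by simpa using hm x rfl)]
  have hlc : lcN (List.replicate a c ++ x :: m') a = a := by
    unfold lcN
    rw [hga1]
    have htake : (List.replicate a c ++ x :: m').take a = List.replicate a c := by
      rw [List.take_append, List.take_of_length_le (by simp),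
        show a - (List.replicate a c).length = 0 by simp, List.take_zero, List.append_nil]
    rw [htake, List.reverse_replicate, takeWhile_replicate_pos _ _ _ (by simp)]
    simp
  have hrc : rcN (List.replicate a c ++ x :: m') a = frunN (x :: m') := by
    unfold rcN frunN
    rw [hga]
    have hdrop : (List.replicate a c ++ x :: m').drop a = x :: m' := by
      rw [List.drop_append, List.drop_of_length_le (by simp),
        show a - (List.replicate a c).length = 0 by simp, List.drop_zero, List.nil_append]
    rw [hdrop]
  rw [hlc, hrc]

theorem natB_rec (a : Nat) (c : Char) (m : List Char) (ha : 1 ≤ a)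
    (hm : ∀ x, m.head? = some x → x ≠ c) :
    natB (List.replicate a c ++ m)
      = if m = [] then 0 else ((min a (frunN m) : Nat) : Int) + natB m := by
  unfold natB
  have hlen : (List.replicate a c ++ m).length = a + m.length := by simp
  rw [hlen, show a + m.length - 1 = (a - 1) + m.length by omega, List.range_add,
    List.map_append, List.sum_append]
  have hfirst : ((List.range (a - 1)).map
      (fun k => contrib (List.replicate a c ++ m) (k + 1))).sum = 0 := by
    apply List.sum_eq_zero
    intro v hv
    simp only [List.mem_map, List.mem_range] at hv
    obtain ⟨k, hk, rfl⟩ := hv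
    unfold contrib
    rw [getD_append_left a c m (k + 1) (by omega),
      getD_append_left a c m (k + 1 - 1) (by omega), if_pos rfl]
  rw [hfirst, zero_add, List.map_map]
  cases m with
  | nil => simp
  | cons x m' =>
    rw [if_neg (by simp)]
    have hshape : ((List.range (x :: m').length).map
        ((fun k => contrib (List.replicate a c ++ x :: m') (k + 1)) ∘ (fun y => (a - 1) + y)))
        = ((List.range (x :: m').length).map (fun y => contrib (List.replicate a c ++ x :: m') (a + y))) := by
      apply List.map_congr_left
      intro y _
      simp only [Function.comp]
      rw [show (a - 1) + y + 1 = a + y by omega]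
    rw [hshape, List.length_cons, List.range_succ_eq_map, List.map_cons, List.sum_cons,
      List.map_map]
    rw [show a + 0 = a by omega, contrib_at_boundary a c x m' ha hm]
    have hshift : ((List.range m'.length).map
        ((fun y => contrib (List.replicate a c ++ x :: m') (a + y)) ∘ Nat.succ)).sum
        = ((List.range m'.length).map (fun k => contrib (x :: m') (k + 1))).sum := by
      apply congrArg
      apply List.map_congr_left
      intro k hk
      rw [List.mem_range] at hk
      simp only [Function.comp]
      rw [show Nat.succ k = k + 1 from rfl]
      exact contrib_shift a c (x :: m') ha hm (k + 1) (by omega) (by simp; omega)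
    rw [hshift]
    rfl

theorem runsN_head (m : List Char) (hm : m ≠ []) :
    (runsN m).headD 0 = ((frunN m : Nat) : Int) := by
  obtain ⟨h1, h2, h3⟩ := decomp m hm
  have hrec := runsN_rec (frunN m) (m.getD 0 ' ')
    (m.dropWhile (fun x => x == m.getD 0 ' ')) h2 h3
  rw [← h1] at hrec
  rw [hrec]
  split_ifs <;> simp

theorem main_eq : ∀ (N : Nat) (l : List Char), l.length ≤ N → adjSum (runsN l) = natB l := by
  intro N
  induction N with
  | zero =>
    intro l hl
    have hn : l = [] := List.length_eq_zero_iff.mp (by omega)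
    rw [hn]
    rfl
  | succ N ih =>
    intro l hl
    by_cases hnil : l = []
    · rw [hnil]; rfl
    · obtain ⟨h1, h2, h3⟩ := decomp l hnil
      have hrec1 := runsN_rec (frunN l) (l.getD 0 ' ')
        (l.dropWhile (fun x => x == l.getD 0 ' ')) h2 h3
      have hrec2 := natB_rec (frunN l) (l.getD 0 ' ')
        (l.dropWhile (fun x => x == l.getD 0 ' ')) h2 h3
      rw [← h1] at hrec1 hrec2
      rw [hrec1, hrec2]
      by_cases hdw : l.dropWhile (fun x => x == l.getD 0 ' ') = []
      · rw [if_pos hdw, if_pos hdw]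
        rfl
      · rw [if_neg hdw, if_neg hdw]
        rw [adjSum_cons _ _ (runsN_ne_nil _), runsN_head _ hdw]
        have hlenl : l.length = frunN l + (l.dropWhile (fun x => x == l.getD 0 ' ')).length := by
          conv_lhs => rw [h1]
          simp
        have hdwlen : (l.dropWhile (fun x => x == l.getD 0 ' ')).length ≤ N := by omega
        rw [ih _ hdwlen]
        congr 1
        simp [Nat.cast_min]

-- ===== VERDICT (by name: the statement is the Claim_ definition above) =====
theorem getSubstringCount_spec : Claim_equal_getSubstringCount := by
  intro s _
  show getSubstringCount s = getSubstringCount_alt s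
  rw [bridgeA, bridgeB]
  exact main_eq s.toList.length s.toList le_rfl
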